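-- pv_equiv track=rewrite | github.com/kanujoa/coding_test_practice | level 0/공 던지기.py | solution
-- ===== SOURCE A (Python) =====
-- def solution(numbers, k):
--     result = 2*k -1
--     if result > len(numbers):
--         while result > len(numbers):      # len(numbers) 대신에 numbers[-1]로 작성하기 가능!
--             result -= len(numbers)
--         return result
--     else:
--         return result
-- ===== SOURCE B (Python) =====
-- def solution(numbers, k):
--     r = 2*k - 1
--     n = len(numbers)
--     if r > n:
--         return (r - 1) % n + 1
--     return r
-- ===== Notes on version B (the rewrite author's own statement) =====
-- stated objective: simpler
-- what changed: Replaces the repeated-subtraction while loop with a single closed-form modulo computation ((2k-2) % n + 1).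
import Mathlib
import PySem

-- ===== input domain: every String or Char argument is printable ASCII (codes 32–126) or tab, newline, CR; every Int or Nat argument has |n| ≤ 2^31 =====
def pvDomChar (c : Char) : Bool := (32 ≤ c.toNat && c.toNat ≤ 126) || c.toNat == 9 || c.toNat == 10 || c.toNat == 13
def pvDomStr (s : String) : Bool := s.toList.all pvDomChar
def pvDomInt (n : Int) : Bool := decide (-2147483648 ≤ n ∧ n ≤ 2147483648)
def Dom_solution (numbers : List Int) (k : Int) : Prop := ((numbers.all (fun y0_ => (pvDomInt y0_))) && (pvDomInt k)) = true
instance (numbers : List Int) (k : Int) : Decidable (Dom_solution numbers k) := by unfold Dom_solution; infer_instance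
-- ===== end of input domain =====

-- B replaces A's repeated-subtraction while loop by one closed-form modulo computation.

-- ===== PORT A =====
-- A's while loop: subtract n while result > n.  The 'n > 0' guard only ensures
-- totality in Lean: when n ≤ 0 and result > n Python loops forever (excluded by Pre_).
def solutionLoop (n : Int) (result : Int) : Int :=
  if _h : 0 < n ∧ n < result then solutionLoop n (result - n) else result
termination_by result.toNat
decreasing_by omega

def solution (numbers : List Int) (k : Int) : Int :=
  let result := 2 * k - 1
  if result > (numbers.length : Int) then solutionLoop (numbers.length : Int) result
  else result

-- ===== PORT B =====
def solution_alt (numbers : List Int) (k : Int) : Int :=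
  let r := 2 * k - 1
  let n := (numbers.length : Int)
  if r > n then PySem.Int.mod (r - 1) n + 1 else r

-- ===== PRECONDITION & SPEC =====
-- Pre_ excludes only numbers = [] with 2*k-1 > 0, where Python A never returns (infinite loop).
def Pre_solution (numbers : List Int) (k : Int) : Prop :=
  numbers ≠ [] ∨ 2 * k - 1 ≤ 0
instance (numbers : List Int) (k : Int) : Decidable (Pre_solution numbers k) := by unfold Pre_solution; infer_instance
def pvWitness_solution : List Int × Int := ([1, 2, 3], 5)

def Spec_solution (numbers : List Int) (k : Int) (out : Int) : Prop := out = solution_alt numbers k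
instance (numbers : List Int) (k : Int) (out : Int) : Decidable (Spec_solution numbers k out) := by unfold Spec_solution; infer_instance

-- ===== CLAIM (what is proved, stated in full; the proofs are below) =====
def Claim_equal_solution : Prop := ∀ (numbers : List Int) (k : Int), Dom_solution numbers k → Pre_solution numbers k → Spec_solution numbers k (solution numbers k)

-- ===== LEMMAS AND PROOFS =====

-- Loop invariant: for 0 < n and n < r, repeatedly subtracting n lands at (r-1) % n + 1.
theorem solutionLoop_eq (n r : Int) (hn : 0 < n) (hr : n < r) :
    solutionLoop n r = (r - 1) % n + 1 := by
  rw [solutionLoop]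
  simp only [hn, hr, and_self, dite_true]
  by_cases h2 : n < r - n
  · rw [solutionLoop_eq n (r - n) hn h2]
    have : r - n - 1 = (r - 1) + n * (-1) := by ring
    rw [this, Int.add_mul_emod_self_left]
  · rw [solutionLoop]
    simp only [hn, h2, and_false, dite_false]
    -- here n < r ≤ 2n, so (r-1) % n = r - n - 1
    have hrange : 0 ≤ r - n - 1 ∧ r - n - 1 < n := by omega
    have : r - 1 = (r - n - 1) + 1 * n := by ring
    rw [this, Int.add_mul_emod_self_right, Int.emod_eq_of_lt hrange.1 hrange.2]
    omega
termination_by r.toNat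
decreasing_by omega

-- ===== VERDICT (by name: the statement is the Claim_ definition above) =====
theorem solution_spec : Claim_equal_solution := by
  intro numbers k hdom hpre
  unfold Spec_solution solution solution_alt
  simp only []
  set r := 2 * k - 1 with hr
  set n := (numbers.length : Int) with hn
  by_cases h : r > n
  · simp only [h, if_true]
    have hn0 : 0 < n := by
      rcases hpre with h1 | h1
      · have : numbers.length ≠ 0 := fun he => h1 (List.length_eq_zero_iff.mp he)
        omega
      · omega
    rw [solutionLoop_eq n r hn0 h, PySem.Int.mod_eq_emod_of_pos (hn0)]
  · simp only [h, if_false]
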